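-- pv_equiv track=rewrite | github.com/meinc-projects/qat-operations-hub | src/modules/crm_enrichment/module.py | _rank_attachments
-- ===== SOURCE A (Python) =====
-- _SUPPORTED_EXTENSIONS = (".pdf", ".jpg", ".jpeg", ".png", ".gif", ".webp")
--
-- _SKIP_KEYWORDS = ("signature", "screenshot")
--
-- _REG_KEYWORDS = ("registration", "reg ")
--
-- def _rank_attachments(attachments: list[dict]) -> list[dict]:
--     """Rank attachments by likelihood of being a registration card."""
--     scored: list[tuple[int, dict]] = []
--     for att in attachments:
--         fname = (att.get("File_Name") or att.get("file_name") or "").lower()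
--         if not any(fname.endswith(ext) for ext in _SUPPORTED_EXTENSIONS):
--             continue
--         if any(kw in fname for kw in _SKIP_KEYWORDS):
--             continue
--
--         if any(kw in fname for kw in _REG_KEYWORDS):
--             scored.append((0, att))
--         elif fname.endswith(".pdf"):
--             scored.append((1, att))
--         else:
--             scored.append((2, att))
--
--     scored.sort(key=lambda pair: (pair[0], pair[1].get("Created_Time", "")))
--     return [att for _, att in scored]
-- ===== SOURCE B (Python) =====
-- _SUPPORTED_EXTENSIONS = (".pdf", ".jpg", ".jpeg", ".png", ".gif", ".webp")
--
-- _SKIP_KEYWORDS = ("signature", "screenshot")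
--
-- _REG_KEYWORDS = ("registration", "reg ")
--
--
-- def _bucket(att):
--     """0 = registration keyword, 1 = other .pdf, 2 = other image, None = dropped."""
--     fname = (att.get("File_Name") or att.get("file_name") or "").lower()
--     if not fname.endswith(_SUPPORTED_EXTENSIONS):
--         return None
--     if "signature" in fname or "screenshot" in fname:
--         return None
--     if "registration" in fname or "reg " in fname:
--         return 0
--     return 1 if fname.endswith(".pdf") else 2
--
--
-- def _rank_attachments(attachments):
--     out = []
--     for b in range(3):
--         out += sorted((att for att in attachments if _bucket(att) == b),
--                       key=lambda att: att.get("Created_Time", ""))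
--     return out
-- ===== Notes on version B (the rewrite author's own statement) =====
-- stated objective: alternative
-- what changed: B drops the (score, att) tuple list and the single tuple-keyed sort entirely: it classifies each attachment into bucket 0/1/2 (or dropped), then for each bucket filters the input and sorts that bucket by Created_Time alone, concatenating reg ++ pdf ++ other.
import Mathlib
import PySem

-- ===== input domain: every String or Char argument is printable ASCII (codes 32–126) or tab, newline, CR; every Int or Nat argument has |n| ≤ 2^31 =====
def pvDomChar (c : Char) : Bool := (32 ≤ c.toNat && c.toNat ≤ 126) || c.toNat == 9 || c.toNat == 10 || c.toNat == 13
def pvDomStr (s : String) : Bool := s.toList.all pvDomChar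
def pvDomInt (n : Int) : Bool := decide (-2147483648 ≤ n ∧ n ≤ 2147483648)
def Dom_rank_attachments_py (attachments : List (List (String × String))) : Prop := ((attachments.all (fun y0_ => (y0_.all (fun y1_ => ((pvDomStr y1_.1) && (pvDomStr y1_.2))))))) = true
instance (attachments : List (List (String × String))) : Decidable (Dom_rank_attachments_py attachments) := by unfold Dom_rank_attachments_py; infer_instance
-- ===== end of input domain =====

-- B replaces the scored-tuple list plus one tuple-keyed sort by a bucket classifier and three single-key per-bucket sorts (objective: alternative decomposition, same cost).

-- shared primitive: att.get(k) on the association-list dict (first match), att.get(k, "")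
def pvGetOpt (att : List (String × String)) (k : String) : Option String :=
  (att.find? (fun kv => kv.1 == k)).map (fun kv => kv.2)

def pvGetD (att : List (String × String)) (k : String) : String :=
  (pvGetOpt att k).getD ""

-- (att.get("File_Name") or att.get("file_name") or "").lower()   — 'or' takes the first truthy (non-None, non-empty) value
def pvFname (att : List (String × String)) : String :=
  PySem.Str.lower
    (match pvGetOpt att "File_Name" with
     | some s => if s ≠ "" then s else pvGetD att "file_name"
     | none => pvGetD att "file_name")

-- ===== PORT A =====
def rank_attachments_py (attachments : List (List (String × String))) : List (List (String × String)) :=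
  let scored : List (Int × List (String × String)) :=
    attachments.foldl (fun acc att =>
      let fname := pvFname att
      if !([".pdf", ".jpg", ".jpeg", ".png", ".gif", ".webp"].any (fun ext => PySem.Str.endswith fname ext)) then
        acc
      else if ["signature", "screenshot"].any (fun kw => PySem.Str.isIn kw fname) then
        acc
      else if ["registration", "reg "].any (fun kw => PySem.Str.isIn kw fname) then
        acc ++ [((0 : Int), att)]
      else if PySem.Str.endswith fname ".pdf" then
        acc ++ [((1 : Int), att)]
      else
        acc ++ [((2 : Int), att)]) []
  (PySem.List.sorted2 scored (fun p => p.1) (fun p => pvGetD p.2 "Created_Time") false).map (fun p => p.2)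

-- ===== PORT B =====
-- fname.endswith(tuple) is Python's "ends with any of them": ported as List.any endswith (exact)
def pvBucket (att : List (String × String)) : Option Int :=
  let fname := pvFname att
  if !([".pdf", ".jpg", ".jpeg", ".png", ".gif", ".webp"].any (fun ext => PySem.Str.endswith fname ext)) then
    none
  else if PySem.Str.isIn "signature" fname || PySem.Str.isIn "screenshot" fname then
    none
  else if PySem.Str.isIn "registration" fname || PySem.Str.isIn "reg " fname then
    some 0
  else if PySem.Str.endswith fname ".pdf" then some 1 else some 2

-- range(3) is the literal [0, 1, 2]
def rank_attachments_py_alt (attachments : List (List (String × String))) : List (List (String × String)) :=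
  ([0, 1, 2] : List Int).foldl (fun out b =>
    out ++ PySem.List.sorted (attachments.filter (fun att => pvBucket att == some b))
            (fun att => pvGetD att "Created_Time") false) []

-- ===== PRECONDITION & SPEC =====
def Spec_rank_attachments_py (attachments : List (List (String × String))) (out : List (List (String × String))) : Prop := out = rank_attachments_py_alt attachments
instance (attachments : List (List (String × String))) (out : List (List (String × String))) : Decidable (Spec_rank_attachments_py attachments out) := by unfold Spec_rank_attachments_py; infer_instance

-- ===== CLAIM (what is proved, stated in full; the proofs are below) =====
def Claim_equal_rank_attachments_py : Prop := ∀ (attachments : List (List (String × String))), Dom_rank_attachments_py attachments → Spec_rank_attachments_py attachments (rank_attachments_py attachments)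

-- ===== LEMMAS AND PROOFS =====

-- the kept pairs one attachment contributes to A's `scored` list, expressed through B's classifier
def pvG (att : List (String × String)) : List (Int × List (String × String)) :=
  match pvBucket att with
  | none => []
  | some s => [(s, att)]

-- A's tuple-sort comparison and B's single-key comparison on pairs
def pvLt2 (a b : Int × List (String × String)) : Bool :=
  decide (a.1 < b.1) || (!decide (b.1 < a.1) && decide (pvGetD a.2 "Created_Time" < pvGetD b.2 "Created_Time"))

def pvLtc (a b : Int × List (String × String)) : Bool :=
  decide (pvGetD a.2 "Created_Time" < pvGetD b.2 "Created_Time")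

theorem pv_ins_nil {α : Type} (bf : α → α → Bool) (x : α) :
    PySem.List.insertBy bf x [] = [x] := rfl

theorem pv_ins_cons {α : Type} (bf : α → α → Bool) (x y : α) (ys : List α) :
    PySem.List.insertBy bf x (y :: ys) =
      if bf x y then x :: y :: ys else y :: PySem.List.insertBy bf x ys := rfl

theorem pv_ins_congr {α : Type} (bf bf' : α → α → Bool) (x : α) (l : List α)
    (h : ∀ y ∈ l, bf x y = bf' x y) :
    PySem.List.insertBy bf x l = PySem.List.insertBy bf' x l := by
  induction l with
  | nil => rfl
  | cons y ys ih =>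
    rw [pv_ins_cons, pv_ins_cons, h y (by simp), ih (fun z hz => h z (by simp [hz]))]

theorem pv_ins_skip {α : Type} (bf : α → α → Bool) (x : α) (pre suf : List α)
    (h : ∀ y ∈ pre, bf x y = false) :
    PySem.List.insertBy bf x (pre ++ suf) = pre ++ PySem.List.insertBy bf x suf := by
  induction pre with
  | nil => rfl
  | cons y ys ih =>
    simp only [List.cons_append, pv_ins_cons, h y (by simp)]
    simp [ih (fun z hz => h z (by simp [hz]))]

theorem pv_ins_stop {α : Type} (bf : α → α → Bool) (x : α) (pre suf : List α)
    (h : ∀ y ∈ suf, bf x y = true) :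
    PySem.List.insertBy bf x (pre ++ suf) = PySem.List.insertBy bf x pre ++ suf := by
  induction pre with
  | nil =>
    cases suf with
    | nil => rfl
    | cons s ss => simp [pv_ins_cons, pv_ins_nil, h s (by simp)]
  | cons y ys ih =>
    simp only [List.cons_append, pv_ins_cons, ih]
    by_cases hb : bf x y <;> simp [hb]

theorem pv_ins_map {α β : Type} (f : α → β) (bf : β → β → Bool) (x : α) (l : List α) :
    (PySem.List.insertBy (fun a b => bf (f a) (f b)) x l).map f =
      PySem.List.insertBy bf (f x) (l.map f) := by
  induction l with
  | nil => rfl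
  | cons y ys ih =>
    simp only [pv_ins_cons, List.map_cons]
    by_cases hb : bf (f x) (f y) <;> simp [hb, ih]

theorem pv_foldl_ins_map {α β : Type} (f : α → β) (bf : β → β → Bool) :
    ∀ (xs : List α) (acc : List α),
      ((xs.foldl (fun a x => PySem.List.insertBy (fun p q => bf (f p) (f q)) x a) acc).map f) =
        (xs.map f).foldl (fun a x => PySem.List.insertBy bf x a) (acc.map f) := by
  intro xs
  induction xs with
  | nil => intro acc; rfl
  | cons x xs ih =>
    intro acc
    simp only [List.foldl_cons, List.map_cons]
    rw [ih, pv_ins_map]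

-- map snd commutes with the Created_Time sort (the key only looks at snd)
theorem pv_map_sorted_snd (xs : List (Int × List (String × String))) :
    (PySem.List.sorted xs (fun p => pvGetD p.2 "Created_Time") false).map (fun p => p.2) =
      PySem.List.sorted (xs.map (fun p => p.2)) (fun att => pvGetD att "Created_Time") false := by
  rw [PySem.List.sorted_eq_foldl_insertBy, PySem.List.sorted_eq_foldl_insertBy]
  simpa using pv_foldl_ins_map (fun p : Int × List (String × String) => p.2)
    (fun a b => decide (pvGetD a "Created_Time" < pvGetD b "Created_Time")) xs []

theorem pv_sorted2_snoc (ps : List (Int × List (String × String))) (x : Int × List (String × String)) :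
    PySem.List.sorted2 (ps ++ [x]) (fun p => p.1) (fun p => pvGetD p.2 "Created_Time") false =
      PySem.List.insertBy pvLt2 x
        (PySem.List.sorted2 ps (fun p => p.1) (fun p => pvGetD p.2 "Created_Time") false) := by
  unfold PySem.List.sorted2
  rw [List.foldl_append]
  rfl

theorem pv_sortedP_snoc (ps : List (Int × List (String × String))) (x : Int × List (String × String)) :
    PySem.List.sorted (ps ++ [x]) (fun p => pvGetD p.2 "Created_Time") false =
      PySem.List.insertBy pvLtc x
        (PySem.List.sorted ps (fun p => pvGetD p.2 "Created_Time") false) := by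
  rw [PySem.List.sorted_eq_foldl_insertBy, PySem.List.sorted_eq_foldl_insertBy, List.foldl_append]
  rfl

theorem pv_mem_sortedP {i : Int} {ps : List (Int × List (String × String))}
    {y : Int × List (String × String)}
    (hy : y ∈ PySem.List.sorted (ps.filter (fun p => p.1 == i)) (fun p => pvGetD p.2 "Created_Time") false) :
    y.1 = i := by
  have h1 := (PySem.List.mem_sorted _ _ _ _).1 hy
  have h2 := List.mem_filter.1 h1
  simpa using h2.2

-- the stable tuple sort splits into the three per-score stable sorts
theorem pv_buckets :
    ∀ (ps : List (Int × List (String × String))),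
      (∀ p ∈ ps, p.1 = 0 ∨ p.1 = 1 ∨ p.1 = 2) →
      PySem.List.sorted2 ps (fun p => p.1) (fun p => pvGetD p.2 "Created_Time") false =
        PySem.List.sorted (ps.filter (fun p => p.1 == 0)) (fun p => pvGetD p.2 "Created_Time") false ++
        PySem.List.sorted (ps.filter (fun p => p.1 == 1)) (fun p => pvGetD p.2 "Created_Time") false ++
        PySem.List.sorted (ps.filter (fun p => p.1 == 2)) (fun p => pvGetD p.2 "Created_Time") false := by
  intro ps
  induction ps using List.reverseRecOn with
  | nil => intro _; rfl
  | append_singleton ps x ih =>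
    intro h
    have hx := h x (by simp)
    have hps : ∀ p ∈ ps, p.1 = 0 ∨ p.1 = 1 ∨ p.1 = 2 := fun p hp => h p (by simp [hp])
    rw [pv_sorted2_snoc, ih hps]
    simp only [List.append_assoc]
    obtain h0 | h1 | h2 := hx
    · have f0 : (ps ++ [x]).filter (fun p => p.1 == 0) = ps.filter (fun p => p.1 == 0) ++ [x] := by
        simp [List.filter_append, h0]
      have f1 : (ps ++ [x]).filter (fun p => p.1 == 1) = ps.filter (fun p => p.1 == 1) := by
        simp [List.filter_append, h0]
      have f2 : (ps ++ [x]).filter (fun p => p.1 == 2) = ps.filter (fun p => p.1 == 2) := by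
        simp [List.filter_append, h0]
      rw [f0, f1, f2, pv_sortedP_snoc]
      have hst : ∀ y ∈ PySem.List.sorted (ps.filter (fun p => p.1 == 1)) (fun p => pvGetD p.2 "Created_Time") false ++
          PySem.List.sorted (ps.filter (fun p => p.1 == 2)) (fun p => pvGetD p.2 "Created_Time") false,
          pvLt2 x y = true := by
        intro y hy
        rcases List.mem_append.1 hy with hy1 | hy2
        · have := pv_mem_sortedP hy1; simp [pvLt2, h0, this]
        · have := pv_mem_sortedP hy2; simp [pvLt2, h0, this]
      rw [pv_ins_stop _ _ _ _ hst]
      have hcg : ∀ y ∈ PySem.List.sorted (ps.filter (fun p => p.1 == 0)) (fun p => pvGetD p.2 "Created_Time") false,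
          pvLt2 x y = pvLtc x y := by
        intro y hy
        have := pv_mem_sortedP hy
        simp [pvLt2, pvLtc, h0, this]
      rw [pv_ins_congr _ _ _ _ hcg]
    · have f0 : (ps ++ [x]).filter (fun p => p.1 == 0) = ps.filter (fun p => p.1 == 0) := by
        simp [List.filter_append, h1]
      have f1 : (ps ++ [x]).filter (fun p => p.1 == 1) = ps.filter (fun p => p.1 == 1) ++ [x] := by
        simp [List.filter_append, h1]
      have f2 : (ps ++ [x]).filter (fun p => p.1 == 2) = ps.filter (fun p => p.1 == 2) := by
        simp [List.filter_append, h1]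
      rw [f0, f1, f2, pv_sortedP_snoc]
      have hsk : ∀ y ∈ PySem.List.sorted (ps.filter (fun p => p.1 == 0)) (fun p => pvGetD p.2 "Created_Time") false,
          pvLt2 x y = false := by
        intro y hy
        have := pv_mem_sortedP hy
        simp [pvLt2, h1, this]
      rw [pv_ins_skip _ _ _ _ hsk]
      have hst : ∀ y ∈ PySem.List.sorted (ps.filter (fun p => p.1 == 2)) (fun p => pvGetD p.2 "Created_Time") false,
          pvLt2 x y = true := by
        intro y hy
        have := pv_mem_sortedP hy
        simp [pvLt2, h1, this]
      rw [pv_ins_stop _ _ _ _ hst]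
      have hcg : ∀ y ∈ PySem.List.sorted (ps.filter (fun p => p.1 == 1)) (fun p => pvGetD p.2 "Created_Time") false,
          pvLt2 x y = pvLtc x y := by
        intro y hy
        have := pv_mem_sortedP hy
        simp [pvLt2, pvLtc, h1, this]
      rw [pv_ins_congr _ _ _ _ hcg]
    · have f0 : (ps ++ [x]).filter (fun p => p.1 == 0) = ps.filter (fun p => p.1 == 0) := by
        simp [List.filter_append, h2]
      have f1 : (ps ++ [x]).filter (fun p => p.1 == 1) = ps.filter (fun p => p.1 == 1) := by
        simp [List.filter_append, h2]
      have f2 : (ps ++ [x]).filter (fun p => p.1 == 2) = ps.filter (fun p => p.1 == 2) ++ [x] := by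
        simp [List.filter_append, h2]
      rw [f0, f1, f2, pv_sortedP_snoc]
      have hsk0 : ∀ y ∈ PySem.List.sorted (ps.filter (fun p => p.1 == 0)) (fun p => pvGetD p.2 "Created_Time") false,
          pvLt2 x y = false := by
        intro y hy
        have := pv_mem_sortedP hy
        simp [pvLt2, h2, this]
      rw [pv_ins_skip _ _ _ _ hsk0]
      have hsk1 : ∀ y ∈ PySem.List.sorted (ps.filter (fun p => p.1 == 1)) (fun p => pvGetD p.2 "Created_Time") false,
          pvLt2 x y = false := by
        intro y hy
        have := pv_mem_sortedP hy
        simp [pvLt2, h2, this]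
      rw [pv_ins_skip _ _ _ _ hsk1]
      have hcg : ∀ y ∈ PySem.List.sorted (ps.filter (fun p => p.1 == 2)) (fun p => pvGetD p.2 "Created_Time") false,
          pvLt2 x y = pvLtc x y := by
        intro y hy
        have := pv_mem_sortedP hy
        simp [pvLt2, pvLtc, h2, this]
      rw [pv_ins_congr _ _ _ _ hcg]

-- A's kept pairs, filtered by score, are B's bucket filter tagged with the score
theorem pv_flatMap_filter (atts : List (List (String × String))) (i : Int) :
    (atts.flatMap pvG).filter (fun p => p.1 == i) =
      (atts.filter (fun att => pvBucket att == some i)).map (fun att => (i, att)) := by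
  induction atts with
  | nil => rfl
  | cons a l ih =>
    simp only [List.flatMap_cons, List.filter_append, List.filter_cons, ih]
    rcases hb : pvBucket a with _ | s
    · simp [pvG, hb]
    · by_cases hsi : s = i
      · subst hsi; simp [pvG, hb]
      · simp [pvG, hb, hsi]

theorem pvBucket_range (att : List (String × String)) (s : Int) (h : pvBucket att = some s) :
    s = 0 ∨ s = 1 ∨ s = 2 := by
  unfold pvBucket at h
  dsimp only at h
  split_ifs at h <;> simp_all

theorem pv_G_range (atts : List (List (String × String))) :
    ∀ p ∈ atts.flatMap pvG, p.1 = 0 ∨ p.1 = 1 ∨ p.1 = 2 := by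
  intro p hp
  rcases List.mem_flatMap.1 hp with ⟨att, _, hpa⟩
  unfold pvG at hpa
  rcases hb : pvBucket att with _ | s
  · rw [hb] at hpa; simp at hpa
  · rw [hb] at hpa
    simp only [List.mem_singleton] at hpa
    subst hpa
    simpa using pvBucket_range att s hb

theorem pv_body (acc : List (Int × List (String × String))) (att : List (String × String)) :
    (if !([".pdf", ".jpg", ".jpeg", ".png", ".gif", ".webp"].any (fun ext => PySem.Str.endswith (pvFname att) ext)) then
        acc
      else if ["signature", "screenshot"].any (fun kw => PySem.Str.isIn kw (pvFname att)) then
        acc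
      else if ["registration", "reg "].any (fun kw => PySem.Str.isIn kw (pvFname att)) then
        acc ++ [((0 : Int), att)]
      else if PySem.Str.endswith (pvFname att) ".pdf" then
        acc ++ [((1 : Int), att)]
      else
        acc ++ [((2 : Int), att)]) = acc ++ pvG att := by
  unfold pvG pvBucket
  simp only [List.any_cons, List.any_nil, Bool.or_false]
  split_ifs <;> simp_all

theorem pv_main (atts : List (List (String × String))) :
    rank_attachments_py atts = rank_attachments_py_alt atts := by
  simp only [rank_attachments_py]
  have hsc : ∀ (l : List (List (String × String))) (acc : List (Int × List (String × String))),
      l.foldl (fun acc att =>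
        if !([".pdf", ".jpg", ".jpeg", ".png", ".gif", ".webp"].any (fun ext => PySem.Str.endswith (pvFname att) ext)) then
          acc
        else if ["signature", "screenshot"].any (fun kw => PySem.Str.isIn kw (pvFname att)) then
          acc
        else if ["registration", "reg "].any (fun kw => PySem.Str.isIn kw (pvFname att)) then
          acc ++ [((0 : Int), att)]
        else if PySem.Str.endswith (pvFname att) ".pdf" then
          acc ++ [((1 : Int), att)]
        else
          acc ++ [((2 : Int), att)]) acc = acc ++ l.flatMap pvG := by
    intro l
    induction l with
    | nil => intro acc; simp
    | cons a t ih =>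
      intro acc
      simp only [List.foldl_cons, List.flatMap_cons]
      rw [pv_body, ih, List.append_assoc]
  rw [hsc atts [], List.nil_append, pv_buckets _ (pv_G_range atts), List.map_append, List.map_append,
    pv_flatMap_filter, pv_flatMap_filter, pv_flatMap_filter,
    pv_map_sorted_snd, pv_map_sorted_snd, pv_map_sorted_snd]
  simp [rank_attachments_py_alt, List.map_map]

-- ===== VERDICT (by name: the statement is the Claim_ definition above) =====
theorem rank_attachments_py_spec : Claim_equal_rank_attachments_py := by
  intro atts _
  unfold Spec_rank_attachments_py
  exact pv_main atts
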